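-- pv_equiv track=rewrite | github.com/paras-a/Data-Structures-and-Algorithms | recursion.py | merge_alternate_strings
-- ===== SOURCE A (Python) =====
-- def merge_alternate_strings(s1, s2):
--     """
--     Merge two strings by alternating their characters using recursion.
--
--     @param s1: First string
--     @param s2: Second string
--     @return: A string with characters alternated from s1 and s2
--     @rtype: str
--
--     Examples:
--         >>> merge_alternate_strings("abc", "xyz")
--         'axbycz'
--         >>> merge_alternate_strings("", "")
--         ''
--     """
--     if len(s1) == 0 and len(s2) == 0:
--         return s1
--     if len(s1) == 0 and len(s2) > 0:
--         return s2
--     if len(s1) > 0 and len(s2) == 0: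
--         return s1
--     s = s1[0] + s2[0]
--     return s + merge_alternate_strings(s1[1:], s2[1:])
-- ===== SOURCE B (Python) =====
-- def merge_alternate_strings(s1, s2):
--     m = min(len(s1), len(s2))
--     out = []
--     for i in range(m):
--         out.append(s1[i])
--         out.append(s2[i])
--     out.append(s1[m:])
--     out.append(s2[m:])
--     return ''.join(out)
-- ===== Notes on version B (the rewrite author's own statement) =====
-- stated objective: faster
-- what changed: Replaces the character-peeling recursion (which rebuilds sliced strings and concatenates at every level) with an iterative index loop over the shorter length accumulating characters into a list, followed by a single tail append and one join.
import Mathlib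
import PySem

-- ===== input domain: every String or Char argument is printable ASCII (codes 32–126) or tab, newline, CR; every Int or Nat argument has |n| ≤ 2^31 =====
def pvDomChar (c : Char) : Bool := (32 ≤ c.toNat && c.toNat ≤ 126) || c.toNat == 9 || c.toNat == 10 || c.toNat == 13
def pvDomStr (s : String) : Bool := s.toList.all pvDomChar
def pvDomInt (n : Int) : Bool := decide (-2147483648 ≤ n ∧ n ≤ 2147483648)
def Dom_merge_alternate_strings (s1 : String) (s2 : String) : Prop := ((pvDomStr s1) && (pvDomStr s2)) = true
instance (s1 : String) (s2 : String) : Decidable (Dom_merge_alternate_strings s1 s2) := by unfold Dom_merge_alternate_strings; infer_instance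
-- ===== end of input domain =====

-- B replaces A's character-peeling recursion with an iterative index loop plus a single tail append (alternative decomposition, same result).


-- ===== PORT A =====
-- A recurses on both strings: base cases return the (possibly empty) remaining string,
-- otherwise it emits s1[0]+s2[0] and recurses on s1[1:], s2[1:].
def mergeAuxA : List Char → List Char → List Char
  | [], [] => []
  | [], b :: t2 => b :: t2
  | a :: t1, [] => a :: t1
  | a :: t1, b :: t2 => a :: b :: mergeAuxA t1 t2

def merge_alternate_strings (s1 : String) (s2 : String) : String :=
  String.mk (mergeAuxA s1.toList s2.toList)

-- ===== PORT B =====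
-- B: m = min(len(s1), len(s2)); for i in range(m): out.append(s1[i]); out.append(s2[i]);
-- then append the tails s1[m:] and s2[m:] (at most one non-empty); ''.join(out).
-- Indexing l.getD i ' ' is exact for s[i] here since every i in range(m) is in range.
def merge_alternate_strings_alt (s1 : String) (s2 : String) : String :=
  let l1 := s1.toList
  let l2 := s2.toList
  let m := min l1.length l2.length
  let out := (List.range m).foldl (fun acc i => acc ++ [l1.getD i ' ', l2.getD i ' ']) ([] : List Char)
  String.mk (out ++ l1.drop m ++ l2.drop m)

-- ===== PRECONDITION & SPEC =====
def Spec_merge_alternate_strings (s1 : String) (s2 : String) (out : String) : Prop := out = merge_alternate_strings_alt s1 s2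
instance (s1 : String) (s2 : String) (out : String) : Decidable (Spec_merge_alternate_strings s1 s2 out) := by unfold Spec_merge_alternate_strings; infer_instance

-- ===== CLAIM (what is proved, stated in full; the proofs are below) =====
def Claim_equal_merge_alternate_strings : Prop := ∀ (s1 : String) (s2 : String), Dom_merge_alternate_strings s1 s2 → Spec_merge_alternate_strings s1 s2 (merge_alternate_strings s1 s2)

-- ===== LEMMAS AND PROOFS =====
lemma mergeAuxA_eq_interleave (l1 l2 : List Char) :
    mergeAuxA l1 l2 =
      (List.range (min l1.length l2.length)).flatMap
          (fun i => [l1.getD i ' ', l2.getD i ' '])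
        ++ l1.drop (min l1.length l2.length) ++ l2.drop (min l1.length l2.length) := by
  induction l1 generalizing l2 with
  | nil => cases l2 <;> simp [mergeAuxA]
  | cons a t1 ih =>
    cases l2 with
    | nil => simp [mergeAuxA]
    | cons b t2 =>
      have hmin : min (a :: t1).length (b :: t2).length
          = min t1.length t2.length + 1 := by
        simp [List.length_cons, Nat.succ_min_succ]
      rw [show mergeAuxA (a :: t1) (b :: t2) = a :: b :: mergeAuxA t1 t2 from rfl,
          hmin, List.range_succ_eq_map, ih t2]
      simp [List.flatMap_cons, List.flatMap_map]

theorem merge_alternate_strings_spec : Claim_equal_merge_alternate_strings := by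
  intro s1 s2 _
  show merge_alternate_strings s1 s2 = merge_alternate_strings_alt s1 s2
  show String.mk _ = String.mk _
  rw [PySem.List.foldl_append_eq_flatMap, mergeAuxA_eq_interleave]
  simp
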